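-- pv_equiv track=rewrite | github.com/yehonatanmizrachi/NetworksProject_TheChase | UI/GUI_helper.py | substring_lines
-- ===== SOURCE A (Python) =====
-- def substring_lines(string, start=0, end=-1):
--     new_str = ""
--     lines_counter = 0
--     for letter in string:
--         if lines_counter >= start:
--             if lines_counter <= end or end == -1:
--                 new_str += letter
--             else:
--                 break
--         if letter == '\n':
--             lines_counter += 1
--     return new_str
-- ===== SOURCE B (Python) =====
-- def substring_lines(string, start=0, end=-1):
--     positions = [i for i, c in enumerate(string) if c == '\n']
--     n = len(string)
--     if start <= 0:
--         sc = 0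
--     elif start - 1 < len(positions):
--         sc = positions[start - 1] + 1
--     else:
--         sc = n
--     if end == -1:
--         ec = n
--     elif end < 0:
--         ec = 0
--     elif end < len(positions):
--         ec = positions[end] + 1
--     else:
--         ec = n
--     return string[sc:ec]
-- ===== Notes on version B (the rewrite author's own statement) =====
-- stated objective: simpler
-- what changed: Replaces the char-by-char accumulation loop with a per-line counter and break by a precomputed index of newline offsets from which the start/end character offsets are derived, returning a single slice of the string.
import Mathlib
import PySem

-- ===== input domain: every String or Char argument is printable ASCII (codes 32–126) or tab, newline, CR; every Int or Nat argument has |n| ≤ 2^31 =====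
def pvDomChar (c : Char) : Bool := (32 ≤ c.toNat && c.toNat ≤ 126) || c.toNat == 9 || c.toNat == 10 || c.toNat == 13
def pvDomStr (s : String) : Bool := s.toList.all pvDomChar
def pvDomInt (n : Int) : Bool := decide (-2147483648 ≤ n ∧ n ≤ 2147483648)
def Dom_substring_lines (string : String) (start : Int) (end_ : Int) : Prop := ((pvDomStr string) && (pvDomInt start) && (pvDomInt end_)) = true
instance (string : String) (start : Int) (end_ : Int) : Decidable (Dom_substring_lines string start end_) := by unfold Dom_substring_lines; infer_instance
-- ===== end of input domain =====

-- B replaces A's char-by-char accumulation loop by an index of newline offsets and one slice (objective: simpler).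

-- ===== PORT A =====
-- counter increment for one character ('lines_counter += 1' when letter == '\n')
def pvBump (ch : Char) : Int := if ch = '\n' then 1 else 0

-- A's for-loop with its break, as structural recursion over the characters;
-- state = current lines_counter, output = the accumulated new_str.
def pvALoop (start end_ : Int) : List Char → Int → List Char
  | [], _ => []
  | ch :: rest, c =>
    if start ≤ c then
      if c ≤ end_ ∨ end_ = -1 then ch :: pvALoop start end_ rest (c + pvBump ch)
      else []
    else pvALoop start end_ rest (c + pvBump ch)

def substring_lines (string : String) (start : Int) (end_ : Int) : String :=
  String.mk (pvALoop start end_ string.toList 0)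

-- ===== PORT B =====
def substring_lines_alt (string : String) (start : Int) (end_ : Int) : String :=
  let cs := string.toList
  -- positions = [i for i, c in enumerate(string) if c == '\n']
  let positions : List Int :=
    (PySem.List.enumerate cs).filterMap (fun p => if p.2 = '\n' then some p.1 else none)
  let n : Int := PySem.List.len cs
  let sc : Int :=
    if start ≤ 0 then 0
    else if start - 1 < PySem.List.len positions then PySem.List.pyGetD positions (start - 1) 0 + 1
    else n
  let ec : Int :=
    if end_ = -1 then n
    else if end_ < 0 then 0
    else if end_ < PySem.List.len positions then PySem.List.pyGetD positions end_ 0 + 1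
    else n
  String.mk (PySem.List.slice cs (some sc) (some ec))

-- ===== PRECONDITION & SPEC =====
def Spec_substring_lines (string : String) (start : Int) (end_ : Int) (out : String) : Prop := out = substring_lines_alt string start end_
instance (string : String) (start : Int) (end_ : Int) (out : String) : Decidable (Spec_substring_lines string start end_ out) := by unfold Spec_substring_lines; infer_instance

-- ===== CLAIM (what is proved, stated in full; the proofs are below) =====
def Claim_equal_substring_lines : Prop := ∀ (string : String) (start : Int) (end_ : Int), Dom_substring_lines string start end_ → Spec_substring_lines string start end_ (substring_lines string start end_)

-- ===== LEMMAS AND PROOFS =====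

-- length of the longest prefix of characters whose running line counter satisfies p
def pvTwl (p : Int → Bool) : List Char → Int → Nat
  | [], _ => 0
  | ch :: t, c => if p c then 1 + pvTwl p t (c + pvBump ch) else 0

-- newline positions of cs, head character at absolute index j (reference form of B's `positions`)
def pvPos : List Char → Int → List Int
  | [], _ => []
  | ch :: t, j => if ch = '\n' then j :: pvPos t (j + 1) else pvPos t (j + 1)

theorem pvPos_eq_filterMap : ∀ (cs : List Char) (j : Int),
    (PySem.List.enumerate cs j).filterMap (fun p => if p.2 = '\n' then some p.1 else none) = pvPos cs j := by
  intro cs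
  induction cs with
  | nil => intro j; simp [pvPos, PySem.List.enumerate_nil]
  | cons ch t ih =>
    intro j
    simp only [PySem.List.enumerate_cons, List.filterMap_cons, pvPos]
    by_cases h : ch = '\n' <;> simp [h, ih]

theorem pvPos_shift : ∀ (cs : List Char) (j : Int), pvPos cs j = (pvPos cs 0).map (· + j) := by
  intro cs
  induction cs with
  | nil => intro j; simp [pvPos]
  | cons ch t ih =>
    intro j
    have hm : pvPos t (j + 1) = (pvPos t 1).map (· + j) := by
      rw [ih (j + 1), ih 1, List.map_map]
      apply List.map_congr_left
      intro x _
      simp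
      ring
    by_cases h : ch = '\n' <;> simp [pvPos, h, hm]

theorem pvTwl_eq_zero (p : Int → Bool) (t : List Char) (c : Int) (h : p c = false) :
    pvTwl p t c = 0 := by
  cases t <;> simp [pvTwl, h]

theorem pvTwl_shift (s k : Int) : ∀ (cs : List Char) (c : Int),
    pvTwl (fun i => decide (i < s)) cs (c + k) = pvTwl (fun i => decide (i < s - k)) cs c := by
  intro cs
  induction cs with
  | nil => intro c; simp [pvTwl]
  | cons ch t ih =>
    intro c
    simp only [pvTwl]
    by_cases h : c < s - k
    · rw [if_pos (show (decide (c + k < s)) = true by simp; omega),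
          if_pos (show (decide (c < s - k)) = true by simp [h])]
      have h2 := ih (c + pvBump ch)
      rw [show c + pvBump ch + k = c + k + pvBump ch by ring] at h2
      rw [h2]
    · rw [if_neg (show ¬ (decide (c + k < s)) = true by simp; omega),
          if_neg (show ¬ (decide (c < s - k)) = true by simp [h])]

theorem pvTwl_congr (p q : Int → Bool) (hpq : ∀ i, p i = q i) (cs : List Char) (c : Int) :
    pvTwl p cs c = pvTwl q cs c := by
  have h : p = q := funext hpq
  rw [h]

theorem pvTwl_true (cs : List Char) : ∀ (c : Int),
    pvTwl (fun _ => true) cs c = cs.length := by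
  induction cs with
  | nil => intro c; simp [pvTwl]
  | cons ch t ih =>
    intro c
    simp [pvTwl, ih]
    omega

-- indexing into a shifted position list
theorem pvGetD_map_add_one (l : List Int) (i : Int) (h0 : 0 ≤ i) (h1 : i < (l.length : Int)) :
    PySem.List.pyGetD (l.map (· + 1)) i 0 = PySem.List.pyGetD l i 0 + 1 := by
  rw [PySem.List.pyGetD_eq_getElem l 0 h0 h1,
      PySem.List.pyGetD_eq_getElem (l.map (· + 1)) 0 h0 (by simpa using h1)]
  simp

-- the count of characters on lines < s equals the offset B computes from the newline index
theorem pvLoPos : ∀ (cs : List Char) (s : Int), 0 < s →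
    (pvTwl (fun i => decide (i < s)) cs 0 : Int) =
      if s - 1 < ((pvPos cs 0).length : Int) then PySem.List.pyGetD (pvPos cs 0) (s - 1) 0 + 1
      else (cs.length : Int) := by
  intro cs
  induction cs with
  | nil =>
    intro s hs
    simp [pvTwl, pvPos]
    omega
  | cons ch t ih =>
    intro s hs
    simp only [pvTwl, show (decide ((0:Int) < s)) = true by simp [hs], if_true]
    by_cases hch : ch = '\n'
    · -- head is a newline: the counter becomes 1 for the tail
      rw [show (0 : Int) + pvBump ch = 0 + 1 by simp [pvBump, hch]]
      rw [pvTwl_shift s 1 t 0]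
      simp only [pvPos, hch, if_true, zero_add]
      rw [pvPos_shift t 1]
      by_cases hs1 : s = 1
      · subst hs1
        rw [pvTwl_eq_zero _ _ _ (by norm_num)]
        rw [if_pos (by norm_num)]
        rw [show (1 : Int) - 1 = 0 by ring, PySem.List.pyGetD_zero_cons]
        simp
      · have ih2 := ih (s - 1) (by omega)
        push_cast
        push_cast at ih2
        rw [ih2]
        by_cases hlt : s - 1 - 1 < ((pvPos t 0).length : Int)
        · rw [if_pos hlt, if_pos (by simp; omega)]
          have hidx : PySem.List.pyGetD ((0:Int) :: (pvPos t 0).map (· + 1)) (s - 1) 0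
              = PySem.List.pyGetD ((pvPos t 0).map (· + 1)) (s - 1 - 1) 0 := by
            rw [PySem.List.pyGetD_eq_getElem ((0:Int) :: (pvPos t 0).map (· + 1)) 0
                  (by omega) (by simp; omega),
                PySem.List.pyGetD_eq_getElem ((pvPos t 0).map (· + 1)) 0
                  (by omega) (by simp; omega)]
            have hn : (s - 1).toNat = (s - 1 - 1).toNat + 1 := by omega
            simp only [hn, List.getElem_cons_succ]
          rw [hidx, pvGetD_map_add_one _ _ (by omega) hlt]
          ring
        · rw [if_neg hlt, if_neg (by simp; omega)]
          simp [List.length_cons]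
          omega
    · -- head is not a newline: the counter stays 0 for the tail
      rw [show (0 : Int) + pvBump ch = 0 by simp [pvBump, hch]]
      simp only [pvPos, hch, if_false, zero_add]
      rw [pvPos_shift t 1]
      have ih2 := ih s hs
      push_cast
      push_cast at ih2
      rw [ih2]
      by_cases hlt : s - 1 < ((pvPos t 0).length : Int)
      · rw [if_pos hlt, if_pos (by simpa using hlt)]
        rw [pvGetD_map_add_one _ _ (by omega) hlt]
        ring
      · rw [if_neg hlt, if_neg (by simpa using hlt)]
        simp [List.length_cons]
        omega

-- A's loop yields exactly the characters between the two prefix counts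
theorem pvALoop_eq (start end_ : Int) : ∀ (cs : List Char) (c : Int),
    pvALoop start end_ cs c =
      (cs.take (pvTwl (fun i => decide (i ≤ end_) || decide (end_ = -1)) cs c)).drop
        (pvTwl (fun i => decide (i < start)) cs c) := by
  intro cs
  induction cs with
  | nil => intro c; simp [pvALoop, pvTwl]
  | cons ch t ih =>
    intro c
    by_cases hge : start ≤ c
    · have hr : (decide (c < start)) = false := by simp; omega
      by_cases hq : c ≤ end_ ∨ end_ = -1
      · have hqb : (decide (c ≤ end_) || decide (end_ = -1)) = true := by
          rcases hq with h | h <;> simp [h]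
        have hr2 : pvTwl (fun i => decide (i < start)) t (c + pvBump ch) = 0 := by
          apply pvTwl_eq_zero
          simp only [pvBump, decide_eq_false_iff_not, not_lt]
          split <;> omega
        simp only [pvALoop, pvTwl, hr, hqb, if_pos hq, if_pos hge, if_true]
        rw [ih (c + pvBump ch), hr2]
        simp [Nat.one_add]
      · have hqb : (decide (c ≤ end_) || decide (end_ = -1)) = false := by
          rcases not_or.mp hq with ⟨ha, hb⟩
          simp [ha, hb]
        rw [show pvALoop start end_ (ch :: t) c = [] by simp [pvALoop, hge, hq]]
        simp [pvTwl, hqb]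
    · have hr : (decide (c < start)) = true := by simp; omega
      by_cases hq : (decide (c ≤ end_) || decide (end_ = -1)) = true
      · simp only [pvALoop, pvTwl, hr, hq, if_neg hge, if_true]
        rw [ih (c + pvBump ch)]
        simp [Nat.one_add]
      · have hqf : (decide (c ≤ end_) || decide (end_ = -1)) = false := by
          simpa using hq
        have hq0 : pvTwl (fun i => decide (i ≤ end_) || decide (end_ = -1)) t (c + pvBump ch) = 0 := by
          apply pvTwl_eq_zero
          simp only [Bool.or_eq_true, decide_eq_true_eq, not_or] at hq
          simp only [pvBump, Bool.or_eq_false_iff, decide_eq_false_iff_not, not_le]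
          constructor
          · have := hq.1
            split <;> omega
          · exact hq.2
        simp only [pvALoop, pvTwl, hr, hqf, if_neg hge, if_true]
        rw [ih (c + pvBump ch), hq0]
        simp

-- ===== VERDICT (by name: the statement is the Claim_ definition above) =====
theorem substring_lines_spec : Claim_equal_substring_lines := by
  intro string start end_ _
  unfold Spec_substring_lines substring_lines substring_lines_alt
  dsimp only
  set cs := string.toList with hcs
  rw [pvPos_eq_filterMap cs 0]
  set LO : Nat := pvTwl (fun i => decide (i < start)) cs 0 with hLO
  set HI : Nat := pvTwl (fun i => decide (i ≤ end_) || decide (end_ = -1)) cs 0 with hHI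
  have hA : pvALoop start end_ cs 0 = (cs.take HI).drop LO := pvALoop_eq start end_ cs 0
  have hsc : (if start ≤ 0 then (0:Int)
      else if start - 1 < PySem.List.len (pvPos cs 0) then PySem.List.pyGetD (pvPos cs 0) (start - 1) 0 + 1
      else PySem.List.len cs) = (LO : Int) := by
    by_cases hs : start ≤ 0
    · rw [if_pos hs, hLO]
      rw [pvTwl_eq_zero _ _ _ (by simp; omega)]
      simp
    · rw [if_neg hs]
      have h := pvLoPos cs start (by omega)
      rw [hLO, h]
      simp [PySem.List.len_eq]
  have hec : (if end_ = -1 then PySem.List.len cs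
      else if end_ < 0 then (0:Int)
      else if end_ < PySem.List.len (pvPos cs 0) then PySem.List.pyGetD (pvPos cs 0) end_ 0 + 1
      else PySem.List.len cs) = (HI : Int) := by
    by_cases h1 : end_ = -1
    · rw [if_pos h1, hHI]
      rw [pvTwl_congr _ (fun _ => true) (by intro i; simp [h1])]
      rw [pvTwl_true]
      simp [PySem.List.len_eq]
    · rw [if_neg h1]
      by_cases h2 : end_ < 0
      · rw [if_pos h2, hHI]
        rw [pvTwl_eq_zero _ _ _ (by simp [h1]; omega)]
        simp
      · rw [if_neg h2]
        have hcg : pvTwl (fun i => decide (i ≤ end_) || decide (end_ = -1)) cs 0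
            = pvTwl (fun i => decide (i < end_ + 1)) cs 0 := by
          apply pvTwl_congr
          intro i
          by_cases h : i ≤ end_
          · have h3 : i < end_ + 1 := by omega
            simp [h, h3]
          · have h3 : ¬ (i < end_ + 1) := by omega
            simp [h, h1, h3]
        have h := pvLoPos cs (end_ + 1) (by omega)
        rw [hHI, hcg, h]
        simp only [PySem.List.len_eq, add_sub_cancel_right]
  simp only [hsc, hec, hA]
  rw [PySem.List.slice_natCast]
  congr 1
  rw [List.drop_take]
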